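-- pv_equiv track=rewrite | github.com/paiml/depyler | examples/hard_pascal_triangle.py | pascal_alternating_sum
-- ===== SOURCE A (Python) =====
-- def pascal_row(n: int) -> list[int]:
--     """Compute the nth row of Pascal's triangle (0-indexed)."""
--     row: list[int] = [1]
--     i: int = 0
--     while i < n:
--         new_row: list[int] = [1]
--         j: int = 0
--         row_len: int = len(row) - 1
--         while j < row_len:
--             next_j: int = j + 1
--             new_row.append(row[j] + row[next_j])
--             j = j + 1
--         new_row.append(1)
--         row = new_row
--         i = i + 1
--     return row
--
-- def pascal_alternating_sum(n: int) -> int: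
--     """Compute alternating sum of nth row (should be 0 for n>0)."""
--     row: list[int] = pascal_row(n)
--     total: int = 0
--     i: int = 0
--     length: int = len(row)
--     while i < length:
--         if i % 2 == 0:
--             total = total + row[i]
--         else:
--             total = total - row[i]
--         i = i + 1
--     return total
-- ===== SOURCE B (Python) =====
-- def pascal_alternating_sum(n: int) -> int:
--     # Alternating sum of the nth Pascal row: 0 for n > 0 (binomial identity),
--     # 1 for n <= 0 (the row is [1]).
--     return 1 if n <= 0 else 0
-- ===== Notes on version B (the rewrite author's own statement) =====
-- stated objective: faster
-- what changed: Replaces building the nth Pascal row and summing it with parity-alternating signs by the closed form 1 if n<=0 else 0 (alternating binomial sum identity).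
import Mathlib
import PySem

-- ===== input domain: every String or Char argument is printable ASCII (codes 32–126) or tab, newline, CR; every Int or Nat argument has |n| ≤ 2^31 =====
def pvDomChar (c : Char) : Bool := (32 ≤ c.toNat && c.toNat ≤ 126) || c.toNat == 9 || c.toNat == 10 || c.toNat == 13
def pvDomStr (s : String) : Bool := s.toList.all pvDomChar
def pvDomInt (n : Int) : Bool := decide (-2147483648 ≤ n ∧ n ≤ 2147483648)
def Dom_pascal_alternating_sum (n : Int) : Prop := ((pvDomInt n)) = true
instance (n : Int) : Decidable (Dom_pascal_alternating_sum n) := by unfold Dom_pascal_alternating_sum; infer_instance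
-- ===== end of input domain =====

-- B replaces A's O(n^2) row construction + signed sum by the O(1) closed form
-- (alternating binomial sum: 0 for n > 0, 1 for n ≤ 0).

-- ===== PORT A =====
-- inner while: appends row[j] + row[j+1] for j = 0 .. len(row)-2 (walks adjacent pairs)
def pascalStepInner : List Int → List Int
  | a :: b :: rest => (a + b) :: pascalStepInner (b :: rest)
  | _ => []

-- one iteration of the outer while of pascal_row: new_row = [1] ++ pairs ++ [1]
def pascalStep (row : List Int) : List Int := 1 :: (pascalStepInner row ++ [1])

-- outer while: i from 0 while i < n, i.e. max(n,0) = n.toNat iterations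
def pascalRowLoop : Nat → List Int → List Int
  | 0, row => row
  | k + 1, row => pascalRowLoop k (pascalStep row)

def pascal_row (n : Int) : List Int := pascalRowLoop n.toNat [1]

-- the summing while loop of pascal_alternating_sum: walks the row with index i
def altLoop : List Int → Int → Int → Int
  | [], total, _ => total
  | x :: rest, total, i =>
      altLoop rest (if i % 2 = 0 then total + x else total - x) (i + 1)

def pascal_alternating_sum (n : Int) : Int := altLoop (pascal_row n) 0 0

-- ===== PORT B =====
def pascal_alternating_sum_alt (n : Int) : Int := if n ≤ 0 then 1 else 0

-- ===== PRECONDITION & SPEC =====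
def Spec_pascal_alternating_sum (n : Int) (out : Int) : Prop := out = pascal_alternating_sum_alt n
instance (n : Int) (out : Int) : Decidable (Spec_pascal_alternating_sum n out) := by unfold Spec_pascal_alternating_sum; infer_instance

-- ===== CLAIM (what is proved, stated in full; the proofs are below) =====
def Claim_equal_pascal_alternating_sum : Prop := ∀ (n : Int), Dom_pascal_alternating_sum n → Spec_pascal_alternating_sum n (pascal_alternating_sum n)

-- ===== LEMMAS AND PROOFS =====

-- mathematical alternating sum Σ (-1)^i xs[i]
def altsum : List Int → Int
  | [] => 0
  | x :: rest => x - altsum rest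

theorem altLoop_eq (xs : List Int) : ∀ (t i : Int),
    altLoop xs t i = t + (if i % 2 = 0 then altsum xs else -altsum xs) := by
  induction xs with
  | nil => intro t i; simp [altLoop, altsum]
  | cons x rest ih =>
      intro t i
      by_cases h : i % 2 = 0
      · have h1 : ¬ (i + 1) % 2 = 0 := by omega
        simp [altLoop, altsum, h, ih, h1]; ring
      · have h1 : (i + 1) % 2 = 0 := by omega
        simp [altLoop, altsum, h, ih, h1]; ring

theorem altsum_inner_append (xs : List Int) (a : Int) (h : xs.getLast? = some 1) :
    altsum (pascalStepInner (a :: xs) ++ [1]) = a := by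
  induction xs generalizing a with
  | nil => simp at h
  | cons b rest ih =>
      cases rest with
      | nil =>
          simp [List.getLast?] at h
          subst h
          simp [pascalStepInner, altsum]
      | cons c rest' =>
          have h' : (b :: c :: rest').getLast? = some 1 := by
            simpa [List.getLast?_cons_cons] using h
          have := ih (a := b) h'
          simp [pascalStepInner, altsum] at this ⊢
          omega

theorem altsum_step (row : List Int) (hh : row.head? = some 1)
    (hl : row.getLast? = some 1) : altsum (pascalStep row) = 0 := by
  cases row with
  | nil => simp at hh
  | cons a rest =>
      simp [List.head?] at hh
      subst hh
      cases rest with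
      | nil => simp [pascalStep, pascalStepInner, altsum]
      | cons b r =>
          have hl' : (b :: r).getLast? = some 1 := by
            simpa [List.getLast?_cons_cons] using hl
          have h2 := altsum_inner_append (b :: r) 1 hl'
          simp [pascalStep, altsum, h2]

theorem step_head (row : List Int) : (pascalStep row).head? = some 1 := by
  simp [pascalStep]

theorem step_last (row : List Int) : (pascalStep row).getLast? = some 1 := by
  show ((1 :: pascalStepInner row) ++ [1]).getLast? = some 1
  rw [List.getLast?_concat]

theorem altsum_loop_pos (k : Nat) : ∀ (row : List Int), row.head? = some 1 →
    row.getLast? = some 1 → altsum (pascalRowLoop (k + 1) row) = 0 := by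
  induction k with
  | zero => intro row hh hl; simpa [pascalRowLoop] using altsum_step row hh hl
  | succ m ih =>
      intro row hh hl
      show altsum (pascalRowLoop (m + 1) (pascalStep row)) = 0
      exact ih (pascalStep row) (step_head row) (step_last row)

theorem pascal_alternating_sum_spec : Claim_equal_pascal_alternating_sum := by
  intro n _
  show pascal_alternating_sum n = pascal_alternating_sum_alt n
  unfold pascal_alternating_sum pascal_alternating_sum_alt pascal_row
  rw [altLoop_eq]
  by_cases h : n ≤ 0
  · have : n.toNat = 0 := Int.toNat_of_nonpos h
    simp [this, pascalRowLoop, altsum, h]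
  · have hpos : 0 < n := by omega
    obtain ⟨k, hk⟩ : ∃ k, n.toNat = k + 1 := by
      refine ⟨n.toNat - 1, ?_⟩; omega
    rw [hk, altsum_loop_pos k [1] (by simp) (by simp)]
    simp [h]
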